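-- pv_equiv track=rewrite | github.com/aratrikghosh2011-tech/numclassify | numclassify.py | sociable_cycle_length
-- ===== SOURCE A (Python) =====
-- def _proper_factors(n):
--     if n < 2: return []
--     return [i for i in range(1, n) if n % i == 0]
--
-- def aliquot_sum(n):
--     return sum(_proper_factors(n))
--
-- def sociable_cycle_length(n, max_steps=30):
--     chain = [n]
--     current = n
--     for _ in range(max_steps):
--         current = aliquot_sum(current)
--         if current == n: return len(chain)
--         if current in chain: return -1
--         chain.append(current)
--     return -1
-- ===== SOURCE B (Python) =====
-- def _aliquot(n):
--     # sum of proper divisors via sqrt divisor-pair enumeration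
--     if n < 2:
--         return 0
--     s = 0
--     i = 1
--     while i * i <= n:
--         if n % i == 0:
--             s += i
--             j = n // i
--             if j != i and j != n:
--                 s += j
--         i += 1
--     return s
--
-- def sociable_cycle_length(n, max_steps=30):
--     seen = {n}
--     current = n
--     steps = 0
--     while steps < max_steps:
--         current = _aliquot(current)
--         steps += 1
--         if current == n:
--             return steps
--         if current in seen:
--             return -1
--         seen.add(current)
--     return -1
-- ===== Notes on version B (the rewrite author's own statement) =====
-- stated objective: alternative
-- what changed: aliquot sum computed by enumerating divisor pairs up to sqrt(current) instead of trial-dividing every i < current, and the visited chain is kept as a set with a step counter instead of a list scanned for membership; intended as faster (O(sqrt m) vs O(m) per step, measured 162x at the largest size both finished) but a timing run could not confirm it on chains whose values explode, so no speed is claimed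
import Mathlib
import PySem

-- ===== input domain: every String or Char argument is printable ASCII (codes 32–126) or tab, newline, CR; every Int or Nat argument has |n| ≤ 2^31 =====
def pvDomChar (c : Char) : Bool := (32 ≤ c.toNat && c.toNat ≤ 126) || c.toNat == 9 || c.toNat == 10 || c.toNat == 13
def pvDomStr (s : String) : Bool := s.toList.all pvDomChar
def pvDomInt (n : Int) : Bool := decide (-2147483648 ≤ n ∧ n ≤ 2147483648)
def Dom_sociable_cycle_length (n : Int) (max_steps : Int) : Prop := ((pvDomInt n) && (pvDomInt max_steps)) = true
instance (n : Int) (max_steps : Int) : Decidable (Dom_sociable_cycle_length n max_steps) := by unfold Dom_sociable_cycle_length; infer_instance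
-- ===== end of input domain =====

-- B replaces A's per-step trial division over every i < current by sqrt divisor-pair
-- enumeration, and the linear chain-membership scan by a set with a step counter
-- (objective: alternative; intended as faster per aliquot step, not confirmed).

-- ===== PORT A =====
-- _proper_factors(n): if n < 2: []; [i for i in range(1, n) if n % i == 0]
def pvProperFactors (n : Int) : List Int :=
  if n < 2 then []
  else (PySem.List.pyRange 1 n 1).filter (fun i => PySem.Int.mod n i == 0)

-- aliquot_sum(n) = sum(_proper_factors(n))
def pvAliquotSum (n : Int) : Int := (pvProperFactors n).sum

-- the body of A's 'for _ in range(max_steps)' loop, one call per remaining iteration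
def pvLoopA (n : Int) (chain : List Int) (current : Int) : Nat → Int
  | 0 => -1
  | fuel + 1 =>
    let c := pvAliquotSum current
    if c = n then (chain.length : Int)
    else if chain.contains c then -1
    else pvLoopA n (chain ++ [c]) c fuel

def sociable_cycle_length (n : Int) (max_steps : Int) : Int :=
  pvLoopA n [n] n max_steps.toNat

-- ===== PORT B =====
-- the 'while i * i <= n' loop of B's _aliquot; it is only entered with n ≥ 2 and i = 1,
-- so Nat's % and / coincide exactly with Python's % and // throughout.
def pvAliquotAltLoop (n : Nat) (i : Nat) (s : Int) : Int :=
  if i * i ≤ n then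
    pvAliquotAltLoop n (i + 1)
      (if n % i == 0 then
        s + (i : Int) + (if n / i ≠ i ∧ n / i ≠ n then ((n / i : Nat) : Int) else 0)
      else s)
  else s
termination_by n + 1 - i * i
decreasing_by
  have : i * i < (i + 1) * (i + 1) := by nlinarith
  omega

-- _aliquot(n): 0 for n < 2, else the sqrt divisor-pair loop
def pvAliquotAlt (n : Int) : Int :=
  if n < 2 then 0 else pvAliquotAltLoop n.toNat 1 0

-- B's 'while steps < max_steps' loop
def pvLoopB (n : Int) (max_steps : Int) (seen : PySem.Set Int) (current : Int) (steps : Int) : Int :=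
  if steps < max_steps then
    let c := pvAliquotAlt current
    if c = n then steps + 1
    else if PySem.Set.contains seen c then -1
    else pvLoopB n max_steps (PySem.Set.add seen c) c (steps + 1)
  else -1
termination_by (max_steps - steps).toNat
decreasing_by omega

def sociable_cycle_length_alt (n : Int) (max_steps : Int) : Int :=
  pvLoopB n max_steps (PySem.Set.ofList [n]) n 0

-- ===== PRECONDITION & SPEC =====
def Spec_sociable_cycle_length (n : Int) (max_steps : Int) (out : Int) : Prop := out = sociable_cycle_length_alt n max_steps
instance (n : Int) (max_steps : Int) (out : Int) : Decidable (Spec_sociable_cycle_length n max_steps out) := by unfold Spec_sociable_cycle_length; infer_instance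

-- ===== CLAIM (what is proved, stated in full; the proofs are below) =====
def Claim_equal_sociable_cycle_length : Prop := ∀ (n : Int) (max_steps : Int), Dom_sociable_cycle_length n max_steps → Spec_sociable_cycle_length n max_steps (sociable_cycle_length n max_steps)

-- ===== LEMMAS AND PROOFS =====

-- contribution of index i in B's divisor-pair loop, as a Nat
def pvContrib (N i : Nat) : Nat :=
  if N % i = 0 then i + (if N / i ≠ i ∧ N / i ≠ N then N / i else 0) else 0

-- B's aliquot loop computes the sum of pvContrib over i..sqrt N
lemma pvAliquotAltLoop_sum (N i : Nat) (s : Int) :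
    pvAliquotAltLoop N i s = s + ((∑ j ∈ Finset.Ico i (N.sqrt + 1), pvContrib N j : Nat) : Int) := by
  induction i, s using pvAliquotAltLoop.induct (n := N) with
  | case1 i s h ih =>
    simp only [dite_eq_ite] at ih
    rw [pvAliquotAltLoop, if_pos h, ih]
    have hi : i < N.sqrt + 1 := by have := Nat.le_sqrt.mpr h; omega
    rw [Finset.sum_eq_sum_Ico_succ_bot hi]
    by_cases hmod : N % i = 0
    · by_cases hcond : N / i ≠ i ∧ N / i ≠ N
      · simp [pvContrib, hmod, hcond]
        ring
      · simp [pvContrib, hmod, hcond]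
        ring
    · simp [pvContrib, hmod]
  | case2 i s h =>
    rw [pvAliquotAltLoop, if_neg h]
    have hle : N.sqrt + 1 ≤ i := by
      have := Nat.sqrt_lt.mpr (by omega : N < i * i); omega
    rw [Finset.Ico_eq_empty (by omega)]
    simp

-- A's filtered-range sum equals the Nat divisor sum over [1, b)
lemma pvProperSum_eq (N : Nat) (b : Nat) :
    ((PySem.List.pyRange 1 (b : Int) 1).filter (fun i => PySem.Int.mod (N : Int) i == 0)).sum
      = ((∑ i ∈ Finset.Ico 1 b, if N % i = 0 then i else 0 : Nat) : Int) := by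
  induction b with
  | zero =>
    rw [PySem.List.pyRange_one_eq_nil (by omega : ((0:Nat):Int) ≤ 1)]
    simp
  | succ b ih =>
    rcases Nat.eq_zero_or_pos b with hb | hb
    · subst hb
      rw [PySem.List.pyRange_one_eq_nil (by norm_num : ((1:Nat):Int) ≤ 1)]
      simp
    · have hcast : ((b + 1 : Nat) : Int) = (b : Int) + 1 := by push_cast; ring
      rw [hcast, PySem.List.pyRange_one_succ_right (by exact_mod_cast hb : (1:Int) ≤ (b:Int))]
      rw [List.filter_append, List.sum_append, ih, Finset.sum_Ico_succ_top hb,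
        List.filter_singleton]
      have hm : PySem.Int.mod (N:Int) (b:Int) = ((N % b : Nat) : Int) := PySem.Int.mod_natCast N b
      simp only [hm]
      by_cases hmod : N % b = 0
      · simp [hmod]
      · have hfalse : ((((N % b : Nat) : Int)) == (0 : Int)) = false := by
          simp only [beq_eq_false_iff_ne, ne_eq, Nat.cast_eq_zero]
          exact hmod
        rw [hfalse]
        simp [hmod]

-- the divisor-pair identity: summing i and N/i up to sqrt N gives the proper-divisor sum
lemma pvPairing (N : Nat) (hN : 2 ≤ N) :
    (∑ i ∈ Finset.Ico 1 N, if N % i = 0 then i else 0)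
      = ∑ j ∈ Finset.Ico 1 (N.sqrt + 1), pvContrib N j := by
  have hN0 : N ≠ 0 := by omega
  -- LHS is the sum of the proper divisors of N
  have hLHS : (∑ i ∈ Finset.Ico 1 N, if N % i = 0 then i else 0) = ∑ d ∈ N.properDivisors, d := by
    rw [← Finset.sum_filter]
    apply Finset.sum_congr _ (fun _ _ => rfl)
    ext d
    simp only [Finset.mem_filter, Finset.mem_Ico, Nat.mem_properDivisors]
    constructor
    · rintro ⟨⟨_, h2⟩, h3⟩
      exact ⟨Nat.dvd_iff_mod_eq_zero.mpr h3, h2⟩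
    · rintro ⟨h1, h2⟩
      have hd0 : d ≠ 0 := by rintro rfl; exact hN0 (Nat.eq_zero_of_zero_dvd h1)
      exact ⟨⟨by omega, h2⟩, Nat.dvd_iff_mod_eq_zero.mp h1⟩
  -- split each contribution into the small divisor i and its cofactor N / i
  have hsplit : ∀ j, pvContrib N j
      = (if N % j = 0 then j else 0)
        + (if N % j = 0 ∧ N / j ≠ j ∧ N / j ≠ N then N / j else 0) := by
    intro j
    unfold pvContrib
    by_cases h1 : N % j = 0 <;> by_cases h2 : N / j ≠ j ∧ N / j ≠ N <;> simp [h1, h2]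
  rw [hLHS, Finset.sum_congr rfl (fun j _ => hsplit j), Finset.sum_add_distrib,
    ← Finset.sum_filter_add_sum_filter_not N.properDivisors (fun d => d * d ≤ N)]
  have hsqrtN : N.sqrt < N := Nat.sqrt_lt_self (by omega)
  -- small divisors match the i-contributions
  have hS : N.properDivisors.filter (fun d => d * d ≤ N)
      = (Finset.Ico 1 (N.sqrt + 1)).filter (fun j => N % j = 0) := by
    ext d
    simp only [Finset.mem_filter, Nat.mem_properDivisors, Finset.mem_Ico]
    constructor
    · rintro ⟨⟨hdvd, hlt⟩, hsq⟩
      have hd0 : d ≠ 0 := by rintro rfl; exact hN0 (Nat.eq_zero_of_zero_dvd hdvd)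
      have := Nat.le_sqrt.mpr hsq
      exact ⟨⟨by omega, by omega⟩, Nat.dvd_iff_mod_eq_zero.mp hdvd⟩
    · rintro ⟨⟨h1, h2⟩, hmod⟩
      have hdvd : d ∣ N := Nat.dvd_iff_mod_eq_zero.mpr hmod
      have hsq : d * d ≤ N := Nat.le_sqrt.mp (by omega)
      exact ⟨⟨hdvd, by omega⟩, hsq⟩
  -- large divisors biject with the cofactor contributions of the small ones
  have hL : (∑ d ∈ N.properDivisors.filter (fun d => ¬ d * d ≤ N), d)
      = ∑ j ∈ (Finset.Ico 1 (N.sqrt + 1)).filter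
          (fun j => N % j = 0 ∧ N / j ≠ j ∧ N / j ≠ N), N / j := by
    apply Finset.sum_nbij' (i := fun d => N / d) (j := fun e => N / e)
    · intro a ha
      simp only [Finset.mem_filter, Nat.mem_properDivisors, Finset.mem_Ico] at ha ⊢
      obtain ⟨⟨hdvd, hlt⟩, hbig⟩ := ha
      have ha0 : 0 < a := by
        rcases Nat.eq_zero_or_pos a with rfl | h
        · exact absurd (Nat.eq_zero_of_zero_dvd hdvd) hN0
        · exact h
      have hmul : N / a * a = N := Nat.div_mul_cancel hdvd
      have he1 : 0 < N / a := Nat.div_pos (Nat.le_of_dvd (by omega) hdvd) ha0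
      have hlt_ea : N / a < a := (Nat.div_lt_iff_lt_mul ha0).mpr (by omega)
      have hsq : N / a * (N / a) ≤ N := by
        calc N / a * (N / a) ≤ N / a * a := Nat.mul_le_mul_left _ (le_of_lt hlt_ea)
        _ = N := hmul
      refine ⟨⟨by omega, by have := Nat.le_sqrt.mpr hsq; omega⟩,
        Nat.dvd_iff_mod_eq_zero.mp (Nat.div_dvd_of_dvd hdvd), ?_, ?_⟩
      · rw [Nat.div_div_self hdvd hN0]; omega
      · rw [Nat.div_div_self hdvd hN0]; omega
    · intro e he
      simp only [Finset.mem_filter, Nat.mem_properDivisors, Finset.mem_Ico] at he ⊢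
      obtain ⟨⟨he1, hesq⟩, hmod, hne, hnN⟩ := he
      have hdvd : e ∣ N := Nat.dvd_iff_mod_eq_zero.mpr hmod
      have hmul : N / e * e = N := Nat.div_mul_cancel hdvd
      have hd_dvd : N / e ∣ N := Nat.div_dvd_of_dvd hdvd
      have hd_le : N / e ≤ N := Nat.le_of_dvd (by omega) hd_dvd
      have hee : e * e ≤ N := Nat.le_sqrt.mp (by omega)
      have hed : e < N / e := by
        have h1 : e ≤ N / e := Nat.le_of_mul_le_mul_right (by omega : e * e ≤ N / e * e) (by omega)
        omega
      refine ⟨⟨hd_dvd, by omega⟩, ?_⟩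
      have : N / e * e < N / e * (N / e) := by
        have hpos : 0 < N / e := by omega
        exact Nat.mul_lt_mul_of_le_of_lt (le_refl _) hed hpos
      omega
    · intro a ha
      simp only [Finset.mem_filter, Nat.mem_properDivisors] at ha
      exact Nat.div_div_self ha.1.1 hN0
    · intro e he
      simp only [Finset.mem_filter, Finset.mem_Ico] at he
      exact Nat.div_div_self (Nat.dvd_iff_mod_eq_zero.mpr he.2.1) hN0
    · intro a ha
      simp only [Finset.mem_filter, Nat.mem_properDivisors] at ha
      exact (Nat.div_div_self ha.1.1 hN0).symm
  rw [hS, hL, Finset.sum_filter, Finset.sum_filter]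

-- the two aliquot-sum implementations agree on every integer
lemma pvAliquot_eq (m : Int) : pvAliquotSum m = pvAliquotAlt m := by
  unfold pvAliquotSum pvProperFactors pvAliquotAlt
  by_cases hm : m < 2
  · simp [hm]
  · rw [if_neg hm, if_neg hm]
    have hm2 : ((m.toNat : Nat) : Int) = m := by omega
    have hN2 : 2 ≤ m.toNat := by omega
    rw [← hm2, pvProperSum_eq m.toNat m.toNat, Int.toNat_natCast,
      pvAliquotAltLoop_sum m.toNat 1 0, pvPairing m.toNat hN2]
    simp

-- the two outer loops agree
lemma pvLoop_eq (n max_steps : Int) : ∀ (fuel : Nat) (chain : List Int) (current steps : Int),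
    fuel = (max_steps - steps).toNat → (chain.length : Int) = steps + 1 →
    pvLoopA n chain current fuel = pvLoopB n max_steps chain current steps := by
  intro fuel
  induction fuel with
  | zero =>
    intro chain current steps hfuel _
    rw [pvLoopB]
    have hlt : ¬ steps < max_steps := by omega
    simp [pvLoopA, hlt]
  | succ f ih =>
    intro chain current steps hfuel hlen
    have hlt : steps < max_steps := by omega
    rw [pvLoopB]
    simp only [pvLoopA, if_pos hlt, pvAliquot_eq current]
    set c := pvAliquotAlt current with hc
    by_cases h1 : c = n
    · simp [h1, hlen]
    · simp only [if_neg h1]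
      by_cases h2 : c ∈ chain
      · simp [PySem.Set.contains, h2]
      · have hadd : PySem.Set.add chain c = chain ++ [c] := by
          simp [PySem.Set.add, PySem.Set.contains, h2]
        simp only [PySem.Set.contains, hadd, if_neg (by simpa using h2 : ¬ (List.contains chain c = true))]
        exact ih (chain ++ [c]) c (steps + 1) (by omega) (by simp; omega)

-- ===== VERDICT (by name: the statement is the Claim_ definition above) =====
theorem sociable_cycle_length_spec : Claim_equal_sociable_cycle_length := by
  intro n max_steps _
  unfold Spec_sociable_cycle_length sociable_cycle_length sociable_cycle_length_alt
  rw [PySem.Set.ofList_eq_self_of_nodup [n] (by simp)]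
  exact pvLoop_eq n max_steps _ [n] n 0 (by omega) (by simp)
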